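-- pv_equiv track=rewrite | github.com/MrBrantCode/unitest_baseline | mut_generate/mist_train_cf/cf_46664/solution.py | is_ecstatic
-- ===== SOURCE A (Python) =====
-- from collections import Counter, deque
--
-- def is_ecstatic(s):
--     """Returns True if the given string s is ecstatic."""
--
--     # Check the basic requirements
--     if len(s) < 5:
--         return False
--
--     # Define the necessary data structures
--     c = Counter(s)
--     quintet = deque([], 5)
--
--     # Check every character in s
--     for ch in s:
--         # If current character is the same as the last one in the deque
--         if quintet and quintet[-1] == ch:
--             return False
--         # If the 5-characters-window quintet already has the current character
--         elif ch in quintet: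
--             return False
--         # If the character doesn't appear at least 3 times in s
--         if c[ch] < 3:
--             return False
--         # If the total occurrences of the character are not a multiple of 3
--         if c[ch] % 3 != 0:
--             return False
--
--         # Add the character to the deque
--         quintet.append(ch)
--
--     return True
-- ===== SOURCE B (Python) =====
-- def is_ecstatic(s):
--     """Returns True if the given string s is ecstatic."""
--     if len(s) < 5:
--         return False
--     # Group by character: for each distinct character, collect its occurrence
--     # positions; the total must be a multiple of 3 (a present character then
--     # automatically occurs >= 3 times), and consecutive occurrences must be at
--     # least 6 positions apart (equivalently: never twice within any window of
--     # the previous 5 characters, which also forbids equal neighbours).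
--     for ch in set(s):
--         idx = [i for i, c in enumerate(s) if c == ch]
--         if len(idx) % 3 != 0:
--             return False
--         if any(b - a < 6 for a, b in zip(idx, idx[1:])):
--             return False
--     return True
-- ===== Notes on version B (the rewrite author's own statement) =====
-- stated objective: alternative
-- what changed: Instead of A's single left-to-right scan that drags a maxlen-5 deque and tests each character against it and against the Counter, B groups the string by distinct character: for each character it collects its occurrence-position list, requires its length to be a multiple of 3, and requires consecutive occurrence positions to be at least 6 apart (an index-gap criterion that replaces the sliding-window/adjacency tests entirely).
import Mathlib
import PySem

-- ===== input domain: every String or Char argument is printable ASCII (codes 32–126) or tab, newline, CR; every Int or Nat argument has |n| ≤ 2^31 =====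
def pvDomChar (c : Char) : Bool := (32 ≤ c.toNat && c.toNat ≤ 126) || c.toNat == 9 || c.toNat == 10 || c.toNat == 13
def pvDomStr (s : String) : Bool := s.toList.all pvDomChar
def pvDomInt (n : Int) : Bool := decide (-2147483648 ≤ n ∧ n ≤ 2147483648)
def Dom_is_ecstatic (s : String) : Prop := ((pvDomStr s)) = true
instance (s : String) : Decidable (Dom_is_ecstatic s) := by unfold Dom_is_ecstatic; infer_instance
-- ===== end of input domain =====

-- B replaces A's single deque-carrying scan by a per-distinct-character grouping:
-- occurrence-position lists with a count-divisibility test and a gap-at-least-6 test;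
-- objective: alternative (same result, different algorithm).

-- ===== PORT A =====

-- deque with maxlen 5: append drops the front element when full
def ecstDequeAppend (q : List Char) (ch : Char) : List Char :=
  if q.length < 5 then q ++ [ch] else q.tail ++ [ch]

-- A's for-loop with its early returns; q is the deque state ('quintet')
def ecstLoop (c : PySem.Dict Char Int) (q : List Char) : List Char → Bool
  | [] => true
  | ch :: rest =>
    if !q.isEmpty && (q.getLast? == some ch) then false   -- quintet and quintet[-1] == ch
    else if q.contains ch then false                       -- ch in quintet
    else if c.getD ch 0 < 3 then false                     -- c[ch] < 3 (Counter lookup never raises)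
    else if c.getD ch 0 % 3 != 0 then false                -- c[ch] % 3 != 0
    else ecstLoop c (ecstDequeAppend q ch) rest

def is_ecstatic (s : String) : Bool :=
  if s.toList.length < 5 then false
  else ecstLoop (PySem.Dict.counter s.toList) [] s.toList

-- ===== PORT B =====

-- the per-character body of B's loop: position list, count divisibility, gap >= 6
def ecstCharOk (l : List Char) (ch : Char) : Bool :=
  let idx := ((PySem.List.enumerate l 0).filter (fun p => p.2 == ch)).map (fun p => p.1)
  if (idx.length : Int) % 3 != 0 then false
  else if (idx.zip (idx.drop 1)).any (fun p => p.2 - p.1 < 6) then false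
  else true

def is_ecstatic_alt (s : String) : Bool :=
  if s.toList.length < 5 then false
  else (PySem.Set.ofList s.toList).all (fun ch => ecstCharOk s.toList ch)

-- ===== PRECONDITION & SPEC =====
def Spec_is_ecstatic (s : String) (out : Bool) : Prop := out = is_ecstatic_alt s
instance (s : String) (out : Bool) : Decidable (Spec_is_ecstatic s out) := by unfold Spec_is_ecstatic; infer_instance

-- ===== CLAIM (what is proved, stated in full; the proofs are below) =====
def Claim_equal_is_ecstatic : Prop := ∀ (s : String), Dom_is_ecstatic s → Spec_is_ecstatic s (is_ecstatic s)

-- ===== LEMMAS AND PROOFS =====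

-- the last (at most) 5 elements of a list: the deque's content after feeding it xs
def last5 (xs : List Char) : List Char := xs.drop (xs.length - 5)

-- appending to the maxlen-5 deque tracks 'last 5 of the processed prefix'
lemma dequeAppend_last5 (pre : List Char) (ch : Char) :
    ecstDequeAppend (last5 pre) ch = last5 (pre ++ [ch]) := by
  unfold ecstDequeAppend last5
  by_cases h : pre.length < 5
  · have h0 : pre.length - 5 = 0 := by omega
    have h1 : pre.length + 1 - 5 = 0 := by omega
    simp [h0, h1, h]
  · have hlen : (pre.drop (pre.length - 5)).length = 5 := by
      simp; omega
    rw [if_neg (by omega), List.tail_drop]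
    have : pre.length - 5 + 1 = pre.length - 4 := by omega
    rw [this]
    have h2 : (pre ++ [ch]).length - 5 = pre.length - 4 := by simp
    rw [h2, List.drop_append_of_le_length]
    omega

-- one loop iteration: the quintet[-1] branch is subsumed by the membership branch
lemma ecstLoop_cons (c : PySem.Dict Char Int) (q : List Char) (ch : Char) (rest : List Char) :
    (ecstLoop c q (ch :: rest) = true) ↔
      (ch ∉ q ∧ (3 ≤ c.getD ch 0 ∧ c.getD ch 0 % 3 = 0) ∧ ecstLoop c (ecstDequeAppend q ch) rest = true) := by
  show (if _ then _ else _) = true ↔ _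
  by_cases hm : ch ∈ q
  · have hc : q.contains ch = true := by simpa using hm
    split_ifs <;> simp_all
  · have hc : q.contains ch = false := by simp_all
    have h1 : (!q.isEmpty && (q.getLast? == some ch)) = false := by
      rcases hq : q.getLast? with _ | a
      · simp
      · have : a ∈ q := List.mem_of_getLast? hq
        simp
        intro _
        rintro rfl
        exact hm this
    rw [h1, if_neg (by simp), hc, if_neg (by simp)]
    by_cases h3 : c.getD ch 0 < 3
    · simp [h3]
    · rw [if_neg h3]
      by_cases h4 : c.getD ch 0 % 3 = 0
      · simp [h4, hm]; omega
      · simp [h4, hm]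

-- A's loop succeeds iff every character passes the window and count tests
lemma loop_char (c : PySem.Dict Char Int) :
    ∀ (l pre0 : List Char),
      (ecstLoop c (last5 pre0) l = true) ↔
        (∀ pre ch post, l = pre ++ ch :: post →
          ch ∉ last5 (pre0 ++ pre) ∧ 3 ≤ c.getD ch 0 ∧ c.getD ch 0 % 3 = 0) := by
  intro l
  induction l with
  | nil =>
    intro pre0
    constructor
    · intro _ pre ch post h
      exact absurd h (by simp)
    · intro _; rfl
  | cons a rest ih =>
    intro pre0
    rw [ecstLoop_cons, dequeAppend_last5, ih (pre0 ++ [a])]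
    constructor
    · rintro ⟨h1, h2, h3⟩ pre ch post heq
      cases pre with
      | nil =>
        simp only [List.nil_append] at heq
        obtain ⟨rfl, rfl⟩ : a = ch ∧ rest = post := by
          constructor <;> injection heq
        simp only [List.append_nil]; exact ⟨h1, h2.1, h2.2⟩
      | cons p pre' =>
        have hp : a = p ∧ rest = pre' ++ ch :: post := by
          constructor <;> injection heq
        obtain ⟨rfl, hr⟩ := hp
        have := h3 pre' ch post hr
        simpa [List.append_assoc] using this
    · intro h
      have h0 := h [] a rest rfl
      refine ⟨by simpa using h0.1, h0.2, ?_⟩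
      intro pre ch post heq
      have := h (a :: pre) ch post (by rw [heq]; rfl)
      simpa [List.append_assoc] using this

-- 'for every split l = pre ++ ch :: post' ↔ 'for every index'
lemma forall_dec_iff {P : List Char → Char → Prop} (l : List Char) :
    (∀ pre ch post, l = pre ++ ch :: post → P pre ch) ↔
      ∀ (j : Nat) (h : j < l.length), P (l.take j) l[j] := by
  constructor
  · intro h j hj
    exact h (l.take j) l[j] (l.drop (j+1))
      (by conv_lhs => rw [← List.take_append_drop j l]
          rw [List.drop_eq_getElem_cons hj])
  · rintro h pre ch post rfl
    have hj : pre.length < (pre ++ ch :: post).length := by simp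
    have h1 : (pre ++ ch :: post).take pre.length = pre := by
      simp
    have h2 : (pre ++ ch :: post)[pre.length] = ch := by
      rw [List.getElem_append_right (le_refl _)]
      simp
    have := h pre.length hj
    rwa [h1, h2] at this

-- the gap-at-least-6 pair predicate
def Gap6 (a b : Int) : Prop := a + 6 ≤ b

-- B's consecutive-pair scan over idx is Pairwise Gap6 on idx
lemma gap_all (idx : List Int) :
    (((idx.zip (idx.drop 1)).any (fun p => p.2 - p.1 < 6)) = false) ↔ idx.Pairwise Gap6 := by
  induction idx with
  | nil => simp
  | cons a rest ih =>
    cases rest with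
    | nil => simp [Gap6]
    | cons b rest' =>
      rw [List.pairwise_cons]
      constructor
      · intro h
        simp only [List.drop_succ_cons, List.drop_zero, List.zip_cons_cons, List.any_cons,
          Bool.or_eq_false_iff, decide_eq_false_iff_not, not_lt] at h
        obtain ⟨hab, htail⟩ := h
        have hpw : (b :: rest').Pairwise Gap6 := by
          rw [← ih]
          simpa using htail
        refine ⟨?_, hpw⟩
        intro x hx
        rcases List.mem_cons.mp hx with rfl | hx'
        · unfold Gap6; omega
        · have := (List.pairwise_cons.mp hpw).1 x hx'
          unfold Gap6 at *; omega
      · rintro ⟨hhead, hpw⟩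
        have hab : Gap6 a b := hhead b (by simp)
        have htail := ih.mpr hpw
        simp only [List.drop_succ_cons, List.drop_zero, List.zip_cons_cons, List.any_cons,
          Bool.or_eq_false_iff, decide_eq_false_iff_not, not_lt]
        constructor
        · unfold Gap6 at hab; omega
        · simpa using htail

-- the canonical separation predicate: equal characters are at least 6 apart
def Sep6 (l : List Char) : Prop :=
  ∀ (i j : Nat) (_ : i < j) (hj : j < l.length), l[i]'(by omega) = l[j] → i + 6 ≤ j

-- B's per-character check, characterised
lemma charOk_iff (l : List Char) (ch : Char) :
    (ecstCharOk l ch = true) ↔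
      (((l.count ch : Int)) % 3 = 0 ∧
        ∀ (i j : Nat) (_ : i < j) (hj : j < l.length),
          l[i]'(by omega) = ch → l[j] = ch → (i : Int) + 6 ≤ (j : Int)) := by
  unfold ecstCharOk
  set E := (PySem.List.enumerate l 0).filter (fun p => p.2 == ch) with hE
  set idx := E.map (fun p => p.1) with hidx
  have hlen : idx.length = l.count ch := by
    calc idx.length = (PySem.List.enumerate l 0).countP (fun p => p.2 == ch) := by
          rw [hidx, List.length_map, hE, ← List.countP_eq_length_filter]
      _ = ((PySem.List.enumerate l 0).map (fun p => p.2)).countP (fun x => x == ch) := by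
          rw [List.countP_map]; rfl
      _ = l.count ch := by rw [PySem.List.map_snd_enumerate]; rfl
  constructor
  · intro h
    by_cases h3 : ((idx.length : Int)) % 3 = 0
    · rw [if_neg (by simpa using h3)] at h
      by_cases hany : ((idx.zip (idx.drop 1)).any (fun p => p.2 - p.1 < 6)) = false
      · refine ⟨by rw [← hlen]; exact h3, ?_⟩
        have hpw : idx.Pairwise Gap6 := (gap_all idx).mp hany
        rw [hidx, List.pairwise_map, hE, List.pairwise_filter] at hpw
        rw [List.pairwise_iff_getElem] at hpw
        intro i j hij hj hi' hj'
        have hiL : i < (PySem.List.enumerate l 0).length := by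
          rw [PySem.List.length_enumerate]; omega
        have hjL : j < (PySem.List.enumerate l 0).length := by
          rw [PySem.List.length_enumerate]; omega
        have := hpw i j hiL hjL hij
        rw [PySem.List.getElem_enumerate, PySem.List.getElem_enumerate] at this
        simp only [beq_iff_eq] at this
        have := this (by simpa using hi') (by simpa using hj')
        unfold Gap6 at this
        simpa using this
      · rw [Bool.not_eq_false] at hany
        rw [hany] at h
        simp at h
    · rw [if_pos (by simpa using h3)] at h
      simp at h
  · rintro ⟨h3, hsep⟩
    have h3' : ((idx.length : Int)) % 3 = 0 := by rw [hlen]; exact h3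
    rw [if_neg (by simpa using h3')]
    have hpw : idx.Pairwise Gap6 := by
      rw [hidx, List.pairwise_map, hE, List.pairwise_filter, List.pairwise_iff_getElem]
      intro i j hiL hjL hij
      rw [PySem.List.getElem_enumerate, PySem.List.getElem_enumerate]
      simp only [beq_iff_eq]
      intro hi' hj'
      have hj : j < l.length := by
        have := hjL; rw [PySem.List.length_enumerate] at this; exact this
      have := hsep i j hij hj (by simpa using hi') (by simpa using hj')
      unfold Gap6
      simpa using this
    rw [(gap_all idx).mpr hpw]
    simp

-- B (past the length guard) holds iff counts divide by 3 and Sep6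
lemma alt_body_iff (l : List Char) :
    (((PySem.Set.ofList l).all (fun ch => ecstCharOk l ch)) = true) ↔
      ((∀ ch ∈ l, ((l.count ch : Int)) % 3 = 0) ∧ Sep6 l) := by
  rw [List.all_eq_true]
  constructor
  · intro h
    constructor
    · intro ch hch
      have := (charOk_iff l ch).mp (h ch (by rw [PySem.Set.mem_ofList]; exact hch))
      exact this.1
    · intro i j hij hj heq
      have hi : i < l.length := by omega
      have hmem : l[i]'hi ∈ l := List.getElem_mem hi
      have := (charOk_iff l (l[i]'hi)).mp (h _ (by rw [PySem.Set.mem_ofList]; exact hmem))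
      have := this.2 i j hij hj rfl heq.symm
      omega
  · rintro ⟨hcnt, hsep⟩ ch hch
    rw [PySem.Set.mem_ofList] at hch
    rw [charOk_iff]
    refine ⟨hcnt ch hch, ?_⟩
    intro i j hij hj hi' hj'
    have := hsep i j hij hj (by rw [hi', hj'])
    omega

-- A's window test at every index is exactly Sep6
lemma window_iff_sep6 (l : List Char) :
    (∀ (j : Nat) (hj : j < l.length), l[j] ∉ last5 (l.take j)) ↔ Sep6 l := by
  constructor
  · intro h i j hij hj heq
    by_contra hclose
    have hjw := h j hj
    apply hjw
    unfold last5
    have htl : (l.take j).length = j := by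
      rw [List.length_take]; omega
    rw [htl]
    rw [List.mem_iff_getElem]
    refine ⟨i - (j - 5), ?_, ?_⟩
    · rw [List.length_drop, htl]; omega
    · rw [List.getElem_drop, List.getElem_take]
      have : j - 5 + (i - (j - 5)) = i := by omega
      simp_rw [this]
      exact heq
  · intro hsep j hj hmem
    unfold last5 at hmem
    have htl : (l.take j).length = j := by
      rw [List.length_take]; omega
    rw [htl, List.mem_iff_getElem] at hmem
    obtain ⟨k, hk, hke⟩ := hmem
    rw [List.length_drop, htl] at hk
    rw [List.getElem_drop, List.getElem_take] at hke
    have hik : j - 5 + k < j := by omega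
    have := hsep (j - 5 + k) j hik hj hke
    omega

lemma ecst_eq (s : String) : is_ecstatic s = is_ecstatic_alt s := by
  unfold is_ecstatic is_ecstatic_alt
  by_cases hlen : s.toList.length < 5
  · rw [if_pos hlen, if_pos hlen]
  · set l := s.toList with hl
    set c := PySem.Dict.counter l with hc
    rw [if_neg hlen, if_neg hlen, Bool.eq_iff_iff, alt_body_iff]
    have hA : (ecstLoop c [] l = true) ↔
        ∀ (j : Nat) (h : j < l.length),
          l[j] ∉ last5 (l.take j) ∧ 3 ≤ c.getD l[j] 0 ∧ c.getD l[j] 0 % 3 = 0 := by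
      have h0 : ([] : List Char) = last5 [] := rfl
      rw [h0, loop_char c l []]
      simp only [List.nil_append]
      exact forall_dec_iff l
    rw [hA]
    constructor
    · intro hAll
      refine ⟨?_, (window_iff_sep6 l).mp (fun j hj => (hAll j hj).1)⟩
      intro ch hch
      obtain ⟨j, hj, rfl⟩ := List.mem_iff_getElem.mp hch
      have := (hAll j hj).2.2
      rwa [hc, PySem.Dict.getD_counter] at this
    · rintro ⟨hcnt, hsep⟩ j hj
      refine ⟨(window_iff_sep6 l).mpr hsep j hj, ?_, ?_⟩ <;>
        rw [hc, PySem.Dict.getD_counter]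
      · have hpos : 0 < l.count l[j] := List.count_pos_iff.mpr (List.getElem_mem hj)
        have := hcnt l[j] (List.getElem_mem hj)
        omega
      · have := hcnt l[j] (List.getElem_mem hj)
        omega

-- ===== VERDICT (by name: the statement is the Claim_ definition above) =====
theorem is_ecstatic_spec : Claim_equal_is_ecstatic := by
  intro s _
  exact ecst_eq s
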